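-- pv_equiv track=rewrite | github.com/DancingOnAir/LeetcodePythonSolution | string/2982_find_longest_special_substring_that_occurs_thrice_ii.py | maximumLength1
-- ===== SOURCE A (Python) =====
-- from itertools import groupby
--
-- def maximumLength1(s: str) -> int:
--     cnt = [(k, len(list(g))) for k, g in groupby(s)]
--
--     lengths = [[] for _ in range(26)]
--     for k, sz in cnt:
--         i = ord(k) - ord('a')
--         lengths[i].append(sz)
--
--     res = -1
--     # 26
--     for l in lengths:
--         if len(l) == 1:
--             if l[0] > 2:
--                 res = max(res, l[0] - 2)
--         elif len(l) == 2:
--             # nlog(n)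
--             l.sort()
--             if l[-1] > 1:
--                 res = max(res, min(l[-1] - 1, l[0]), l[-1] - 2)
--         elif len(l) > 2:
--             # nlog(n)
--             l.sort()
--             res = max(res, l[-1] - 2)
--             res = max(res, min(l[-1] - 1, l[-2]))
--             res = max(res, l[-3])
--
--     return res
-- ===== SOURCE B (Python) =====
-- from itertools import groupby
--
-- def maximumLength1(s: str) -> int:
--     # group runs per character, then binary-search the largest feasible length L
--     runs = {}
--     for k, g in groupby(s):
--         runs.setdefault(k, []).append(len(list(g)))
--     best0 = 0
--     for rs in runs.values():
--         for r in rs: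
--             best0 = max(best0, r)
--     lo, hi, best = 1, best0, -1
--     while lo <= hi:
--         mid = (lo + hi) // 2
--         if any(sum(max(0, r - mid + 1) for r in rs) >= 3 for rs in runs.values()):
--             best = mid
--             lo = mid + 1
--         else:
--             hi = mid - 1
--     return best
-- ===== Notes on version B (the rewrite author's own statement) =====
-- stated objective: alternative
-- what changed: Replaces A's per-character case split (26-slot array, sort each bucket, combine its top runs in a closed form) with a dict of run lengths per character, a counting feasibility test sum(max(0, r - L + 1)) >= 3, and a binary search for the largest feasible length L.
-- outside the precondition, e.g. on maximumLength1('aaGG'): A returns 1, B returns -1; on maximumLength1('A'): A raises IndexError, B returns -1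
import Mathlib
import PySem

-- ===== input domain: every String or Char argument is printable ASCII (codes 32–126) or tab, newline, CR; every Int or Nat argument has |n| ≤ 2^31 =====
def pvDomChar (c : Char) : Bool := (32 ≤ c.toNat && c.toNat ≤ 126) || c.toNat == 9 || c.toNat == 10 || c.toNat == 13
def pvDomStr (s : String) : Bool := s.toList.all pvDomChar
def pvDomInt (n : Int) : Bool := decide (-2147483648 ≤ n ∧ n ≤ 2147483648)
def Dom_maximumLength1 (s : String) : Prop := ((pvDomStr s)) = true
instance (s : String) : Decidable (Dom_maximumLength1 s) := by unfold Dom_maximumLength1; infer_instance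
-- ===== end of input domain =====

-- B replaces A's per-character case-split closed form (sort each bucket, combine top runs)
-- with a counting feasibility test plus binary search over the candidate length (objective: alternative).

-- ===== PORT A =====
-- shared transliteration of itertools.groupby run-length pairs [(k, len(list(g))) for k, g in groupby(s)]
def pvRunsAux (c : Char) (n : Int) : List Char → List (Char × Int)
  | [] => [(c, n)]
  | d :: ds => if d = c then pvRunsAux c (n + 1) ds else (c, n) :: pvRunsAux d 1 ds

def pvRuns : List Char → List (Char × Int)
  | [] => []
  | c :: cs => pvRunsAux c 1 cs

def maximumLength1 (s : String) : Int :=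
  let cnt := pvRuns s.toList
  let lengths0 : List (List Int) := (PySem.List.pyRange 0 26 1).map (fun _ => ([] : List Int))
  let lengths := cnt.foldl (fun ls p =>
      let i : Int := (p.1.toNat : Int) - 97
      match PySem.List.pyGet? ls i with        -- lengths[i].append(sz): read, then write back
      | some l => PySem.List.pySetD ls i (l ++ [p.2])
      | none => ls) lengths0                   -- IndexError: unreachable under Pre_
  lengths.foldl (fun res l =>
      if l.length = 1 then
        (if 2 < PySem.List.pyGetD l 0 0 then max res (PySem.List.pyGetD l 0 0 - 2) else res)
      else if l.length = 2 then
        let l := PySem.List.sorted l (fun x => x) false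
        (if 1 < PySem.List.pyGetD l (-1) 0 then
          max (max res (min (PySem.List.pyGetD l (-1) 0 - 1) (PySem.List.pyGetD l 0 0)))
              (PySem.List.pyGetD l (-1) 0 - 2)
        else res)
      else if 2 < l.length then
        let l := PySem.List.sorted l (fun x => x) false
        let res := max res (PySem.List.pyGetD l (-1) 0 - 2)
        let res := max res (min (PySem.List.pyGetD l (-1) 0 - 1) (PySem.List.pyGetD l (-2) 0))
        max res (PySem.List.pyGetD l (-3) 0)
      else res) (-1)

-- ===== PORT B =====
def pvFeasible (d : PySem.Dict Char (List Int)) (mid : Int) : Bool :=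
  d.values.any (fun rs => decide (3 ≤ rs.foldl (fun acc r => acc + max 0 (r - mid + 1)) 0))

def pvBisect (d : PySem.Dict Char (List Int)) (lo hi best : Int) : Int :=
  if h : lo ≤ hi then
    let mid := PySem.Int.floordiv (lo + hi) 2
    if pvFeasible d mid then pvBisect d (mid + 1) hi mid
    else pvBisect d lo (mid - 1) best
  else best
termination_by (hi + 1 - lo).toNat
decreasing_by
  · have := (PySem.Int.floordiv_two_mid_bounds h)
    omega
  · have := (PySem.Int.floordiv_two_mid_bounds h)
    omega

def maximumLength1_alt (s : String) : Int :=
  let runs := (pvRuns s.toList).foldl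
      (fun (d : PySem.Dict Char (List Int)) p => d.modify p.1 [] (· ++ [p.2])) PySem.Dict.empty
  let best0 := runs.values.foldl (fun b rs => rs.foldl (fun b r => max b r) b) 0
  pvBisect runs 1 best0 (-1)

-- ===== PRECONDITION & SPEC =====
-- bucket slot that A's index arithmetic ord(c)-97 (with Python's negative-index wrap) selects
def pvIdx (c : Char) : Nat := (c.toNat - 71) % 26

-- Pre_ excludes strings on which A raises IndexError (a character with ord outside 71..122) and
-- strings in which two distinct characters share one wrapped bucket slot (ord congruent mod 26):
-- outside the problem's stated lowercase domain A's negative-index wrap counts such characters'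
-- runs in one shared bucket while B keeps characters apart, and neither reading is specified
-- for such input (see cites).
def Pre_maximumLength1 (s : String) : Prop :=
  (s.toList.all (fun c => decide (71 ≤ c.toNat) && decide (c.toNat ≤ 122))) = true ∧
  (s.toList.all (fun c => s.toList.all (fun d => (pvIdx c != pvIdx d) || (c == d)))) = true
instance (s : String) : Decidable (Pre_maximumLength1 s) := by unfold Pre_maximumLength1; infer_instance

def pvWitness_maximumLength1 : String := "abccbaabc"

def Spec_maximumLength1 (s : String) (out : Int) : Prop := out = maximumLength1_alt s
instance (s : String) (out : Int) : Decidable (Spec_maximumLength1 s out) := by unfold Spec_maximumLength1; infer_instance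

-- ===== CLAIM (what is proved, stated in full; the proofs are below) =====
def Claim_equal_maximumLength1 : Prop := ∀ (s : String), Dom_maximumLength1 s → Pre_maximumLength1 s → Spec_maximumLength1 s (maximumLength1 s)

-- ===== LEMMAS AND PROOFS =====

-- proof-side: per-bucket closed form read off the descending sorted bucket, and helpers
def pvVTop : List Int → Int
  | [] => -1
  | [a] => if 2 < a then a - 2 else -1
  | [a, b] => if 1 < a then max (min (a - 1) b) (a - 2) else -1
  | a :: b :: c :: _ => max (max (a - 2) (min (a - 1) b)) c

def pvV (l : List Int) : Int := pvVTop ((PySem.List.sorted l (fun x => x)).reverse)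

-- the exact body of A's res-update loop
def pvStepA (res : Int) (l : List Int) : Int :=
  if l.length = 1 then
    (if 2 < PySem.List.pyGetD l 0 0 then max res (PySem.List.pyGetD l 0 0 - 2) else res)
  else if l.length = 2 then
    let l := PySem.List.sorted l (fun x => x)
    (if 1 < PySem.List.pyGetD l (-1) 0 then
      max (max res (min (PySem.List.pyGetD l (-1) 0 - 1) (PySem.List.pyGetD l 0 0)))
          (PySem.List.pyGetD l (-1) 0 - 2)
    else res)
  else if 2 < l.length then
    let l := PySem.List.sorted l (fun x => x)
    let res := max res (PySem.List.pyGetD l (-1) 0 - 2)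
    let res := max res (min (PySem.List.pyGetD l (-1) 0 - 1) (PySem.List.pyGetD l (-2) 0))
    max res (PySem.List.pyGetD l (-3) 0)
  else res

def pvBucket (cnt : List (Char × Int)) (c : Char) : List Int :=
  List.map (fun x => x.2) (List.filter (fun p => p.1 == c) cnt)

def pvBucketI (cnt : List (Char × Int)) (j : Nat) : List Int :=
  List.map (fun x => x.2) (List.filter (fun p => pvIdx p.1 == j) cnt)

def pvBuckets (cnt : List (Char × Int)) : List (List Int) :=
  (List.range 26).map (fun j => pvBucketI cnt j)

-- index access under A's wrap arithmetic
theorem pvIdx_lt (c : Char) : pvIdx c < 26 := Nat.mod_lt _ (by omega)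

theorem pySetD_neg {α : Type} (xs : List α) (k : Nat) (h0 : 0 < k) (hle : k ≤ xs.length) (v : α) :
    PySem.List.pySetD xs (-(k : Int)) v = xs.set (xs.length - k) v := by
  have h2 : -(xs.length : Int) ≤ -(k : Int) := by omega
  simp [PySem.List.pySetD, PySem.List.pySet?, PySem.List.pyIdx?, h2, Nat.pos_iff_ne_zero.mp h0]

theorem accessA (ls : List (List Int)) (hlen : ls.length = 26) (c : Char)
    (h1 : 71 ≤ c.toNat) (h2 : c.toNat ≤ 122) :
    PySem.List.pyGet? ls ((c.toNat : Int) - 97) = ls[pvIdx c]? ∧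
    ∀ v, PySem.List.pySetD ls ((c.toNat : Int) - 97) v = ls.set (pvIdx c) v := by
  by_cases hc : 97 ≤ c.toNat
  · have hidx : pvIdx c = c.toNat - 97 := by unfold pvIdx; omega
    have hi : ((c.toNat : Int) - 97) = ((c.toNat - 97 : Nat) : Int) := by omega
    rw [hidx, hi]
    exact ⟨PySem.List.pyGet?_natCast ls _, fun v => PySem.List.pySetD_natCast ls _ v⟩
  · have hidx : pvIdx c = c.toNat - 71 := by unfold pvIdx; omega
    have hk : ((c.toNat : Int) - 97) = -(((97 - c.toNat : Nat)) : Int) := by omega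
    have h0 : 0 < 97 - c.toNat := by omega
    have hle : 97 - c.toNat ≤ ls.length := by omega
    have h26 : ls.length - (97 - c.toNat) = pvIdx c := by rw [hidx]; omega
    rw [hk]
    exact ⟨by rw [PySem.List.pyGet?_neg_natCast ls _ h0 hle, h26],
           fun v => by rw [pySetD_neg ls _ h0 hle, h26]⟩

-- run-length facts
theorem pvRunsAux_fst (ds : List Char) : ∀ (c : Char) (n : Int), ∀ p ∈ pvRunsAux c n ds, p.1 = c ∨ p.1 ∈ ds := by
  induction ds with
  | nil => intro c n p hp; simp [pvRunsAux] at hp; simp [hp]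
  | cons d ds ih =>
    intro c n p hp
    simp only [pvRunsAux] at hp
    split at hp
    · rcases ih c (n+1) p hp with h | h <;> simp [h]
    · rcases List.mem_cons.mp hp with h | h
      · simp [h]
      · rcases ih d 1 p h with h' | h' <;> simp [h']

theorem pvRunsAux_pos (ds : List Char) : ∀ (c : Char) (n : Int), 1 ≤ n → ∀ p ∈ pvRunsAux c n ds, 1 ≤ p.2 := by
  induction ds with
  | nil => intro c n hn p hp; simp [pvRunsAux] at hp; simp [hp]; omega
  | cons d ds ih =>
    intro c n hn p hp
    simp only [pvRunsAux] at hp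
    split at hp
    · exact ih c (n+1) (by omega) p hp
    · rcases List.mem_cons.mp hp with h | h
      · simp [h]; omega
      · exact ih d 1 (by omega) p h

theorem pvRuns_fst (cs : List Char) : ∀ p ∈ pvRuns cs, p.1 ∈ cs := by
  cases cs with
  | nil => simp [pvRuns]
  | cons c cs =>
    intro p hp
    rcases pvRunsAux_fst cs c 1 p hp with h | h <;> simp [h]

theorem pvRuns_pos (cs : List Char) : ∀ p ∈ pvRuns cs, 1 ≤ p.2 := by
  cases cs with
  | nil => simp [pvRuns]
  | cons c cs => exact pvRunsAux_pos cs c 1 (by omega)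

-- the feasibility sum  sum(max(0, r - L + 1) for r in l)
def pvF (l : List Int) (L : Int) : Int := (l.map (fun r => max 0 (r - L + 1))).sum

theorem pvF_nonneg (l : List Int) (L : Int) : 0 ≤ pvF l L := by
  induction l with
  | nil => simp [pvF]
  | cons x t ih => simp only [pvF, List.map_cons, List.sum_cons] at *; omega

theorem pvF_zero (l : List Int) (L : Int) (h : ∀ r ∈ l, r < L) : pvF l L = 0 := by
  induction l with
  | nil => simp [pvF]
  | cons x t ih =>
    simp only [pvF, List.map_cons, List.sum_cons] at *
    have hx := h x (by simp)
    have := ih (fun r hr => h r (by simp [hr]))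
    omega

theorem pvKeyTop (m : List Int) (hs : m.Pairwise (fun a b => b ≤ a)) (hpos : ∀ r ∈ m, 1 ≤ r)
    (L : Int) (hL : 1 ≤ L) : 3 ≤ pvF m L ↔ L ≤ pvVTop m := by
  match m with
  | [] => simp [pvF, pvVTop]; omega
  | [a] => simp only [pvF, pvVTop, List.map_cons, List.map_nil, List.sum_cons, List.sum_nil]; split_ifs <;> omega
  | [a, b] =>
    have hba : b ≤ a := by simp [List.pairwise_cons] at hs; tauto
    simp only [pvF, pvVTop, List.map_cons, List.map_nil, List.sum_cons, List.sum_nil]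
    split_ifs <;> omega
  | a :: b :: c :: t =>
    simp only [List.pairwise_cons] at hs
    have hba : b ≤ a := by tauto
    have hcb : c ≤ b := by tauto
    have htc : ∀ r ∈ t, r ≤ c := by tauto
    have hc1 : 1 ≤ c := hpos c (by simp)
    simp only [pvF, pvVTop, List.map_cons, List.sum_cons]
    have hnn : 0 ≤ pvF t L := pvF_nonneg t L
    rcases (by omega : L ≤ c ∨ c < L) with hLc | hLc
    · have h3 : 3 ≤ max 0 (a - L + 1) + (max 0 (b - L + 1) + (max 0 (c - L + 1) + (t.map (fun r => max 0 (r - L + 1))).sum)) := by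
        have : pvF t L = (t.map (fun r => max 0 (r - L + 1))).sum := rfl
        omega
      constructor
      · intro _; omega
      · intro _; exact h3
    · have h0 : pvF t L = 0 := pvF_zero t L (fun r hr => by have := htc r hr; omega)
      have : pvF t L = (t.map (fun r => max 0 (r - L + 1))).sum := rfl
      omega

theorem pvKey (l : List Int) (hpos : ∀ r ∈ l, 1 ≤ r) (L : Int) (hL : 1 ≤ L) :
    3 ≤ pvF l L ↔ L ≤ pvV l := by
  have hperm : ((PySem.List.sorted l (fun x => x)).reverse).Perm l :=
    (List.reverse_perm _).trans (PySem.List.sorted_perm l (fun x => x) false)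
  have hF : pvF ((PySem.List.sorted l (fun x => x)).reverse) L = pvF l L := by
    unfold pvF; exact List.Perm.sum_eq (hperm.map _)
  have hpair : ((PySem.List.sorted l (fun x => x)).reverse).Pairwise (fun a b => b ≤ a) := by
    rw [List.pairwise_reverse]
    exact PySem.List.sorted_pairwise l (fun x => x)
  rw [← hF, pvV]
  exact pvKeyTop _ hpair (fun r hr => hpos r (hperm.mem_iff.mp hr)) L hL

theorem pvV_le (l : List Int) (M : Int) (hM : 0 ≤ M) (hub : ∀ r ∈ l, r ≤ M) : pvV l ≤ M := by
  have hmem : ∀ r ∈ (PySem.List.sorted l (fun x => x)).reverse, r ≤ M := by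
    intro r hr
    exact hub r (((List.reverse_perm _).trans (PySem.List.sorted_perm l (fun x => x) false)).mem_iff.mp hr)
  rw [pvV]
  match hme : (PySem.List.sorted l (fun x => x)).reverse with
  | [] => simpa [pvVTop] using by omega
  | [a] =>
    have ha := hmem a (by rw [hme]; simp)
    simp only [pvVTop]; split_ifs <;> omega
  | [a, b] =>
    have ha := hmem a (by rw [hme]; simp)
    have hb := hmem b (by rw [hme]; simp)
    simp only [pvVTop]; split_ifs <;> omega
  | a :: b :: c :: t =>
    have ha := hmem a (by rw [hme]; simp)
    have hb := hmem b (by rw [hme]; simp)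
    have hc := hmem c (by rw [hme]; simp)
    simp only [pvVTop]; omega

theorem pvV_pos_or (l : List Int) (hpos : ∀ r ∈ l, 1 ≤ r) : pvV l = -1 ∨ 1 ≤ pvV l := by
  have hmem : ∀ r ∈ (PySem.List.sorted l (fun x => x)).reverse, 1 ≤ r := by
    intro r hr
    exact hpos r (((List.reverse_perm _).trans (PySem.List.sorted_perm l (fun x => x) false)).mem_iff.mp hr)
  rw [pvV]
  match hme : (PySem.List.sorted l (fun x => x)).reverse with
  | [] => simp [pvVTop]
  | [a] =>
    have ha := hmem a (by rw [hme]; simp)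
    simp only [pvVTop]; split_ifs <;> omega
  | [a, b] =>
    have ha := hmem a (by rw [hme]; simp)
    have hb := hmem b (by rw [hme]; simp)
    simp only [pvVTop]; split_ifs <;> omega
  | a :: b :: c :: t =>
    have hc := hmem c (by rw [hme]; simp)
    simp only [pvVTop]; omega

-- negative-index helpers on snoc-shaped lists
theorem pyGetD_snoc2 (xs : List Int) (u v : Int) (d : Int) :
    PySem.List.pyGetD (xs ++ [u, v]) (-2) d = u := by
  rw [PySem.List.pyGetD_neg_ofNat _ 2 d (by omega) (by simp)]
  simp [List.getElem_append_right]

theorem pyGetD_snoc3 (xs : List Int) (u v w : Int) (d : Int) :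
    PySem.List.pyGetD (xs ++ [u, v, w]) (-3) d = u := by
  rw [PySem.List.pyGetD_neg_ofNat _ 3 d (by omega) (by simp)]
  simp [List.getElem_append_right]

theorem stepA_eq (l : List Int) (res : Int) (hres : -1 ≤ res) :
    pvStepA res l = max res (pvV l) := by
  match l with
  | [] =>
    have h : PySem.List.sorted ([] : List Int) (fun x => x) = [] := by
      rw [PySem.List.sorted_eq_nil_iff]
    simp [pvStepA, pvV, h, pvVTop]; omega
  | [x] =>
    have h : PySem.List.sorted [x] (fun x => x) = [x] :=
      PySem.List.sorted_eq_self_of_pairwise [x] (fun x => x) (by simp)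
    simp only [pvStepA, pvV, h, List.length_cons, List.length_nil]
    simp only [PySem.List.pyGetD_zero_cons, List.reverse_cons, List.reverse_nil, List.nil_append, pvVTop]
    split_ifs <;> omega
  | [x, y] =>
    rcases le_total x y with hxy | hxy
    · have h : PySem.List.sorted [x, y] (fun x => x) = [x, y] :=
        PySem.List.sorted_eq_self_of_pairwise [x, y] (fun x => x) (by simp [hxy])
      simp only [pvStepA, pvV, h]
      norm_num
      rw [show ([x, y] : List Int) = [x] ++ [y] by simp]
      rw [PySem.List.pyGetD_neg_one_append_singleton]
      simp only [List.reverse_append, List.reverse_cons, List.reverse_nil, List.nil_append,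
        List.cons_append, PySem.List.pyGetD_zero_cons, pvVTop]
      split_ifs <;> omega
    · have h : PySem.List.sorted [x, y] (fun x => x) = [y, x] :=
        PySem.List.sorted_id_eq_of_perm_of_pairwise [x, y] [y, x] (List.Perm.swap x y []) (by simp [hxy])
      simp only [pvStepA, pvV, h]
      norm_num
      rw [show ([y, x] : List Int) = [y] ++ [x] by simp]
      rw [PySem.List.pyGetD_neg_one_append_singleton]
      simp only [List.reverse_append, List.reverse_cons, List.reverse_nil, List.nil_append,
        List.cons_append, PySem.List.pyGetD_zero_cons, pvVTop]
      split_ifs <;> omega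
  | x :: y :: z :: t =>
    have hlen : (x :: y :: z :: t).length = t.length + 3 := by simp
    have h1 : ¬ ((x :: y :: z :: t).length = 1) := by omega
    have h2 : ¬ ((x :: y :: z :: t).length = 2) := by omega
    have h3 : 2 < (x :: y :: z :: t).length := by omega
    set l := x :: y :: z :: t with hl
    set m := (PySem.List.sorted l (fun x => x)).reverse with hm
    have hmlen : m.length = t.length + 3 := by
      simp [hm, PySem.List.length_sorted, hlen]
    obtain ⟨a, b, c, t', hme⟩ : ∃ a b c t', m = a :: b :: c :: t' := by
      match hx : m, hmlen with
      | a :: b :: c :: t', _ => exact ⟨a, b, c, t', rfl⟩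
    have hsl : PySem.List.sorted l (fun x => x) = t'.reverse ++ [c, b, a] := by
      have := congrArg List.reverse hme
      simpa [hm] using this
    simp only [pvStepA, if_neg h1, if_neg h2, if_pos h3, hsl, pvV]
    rw [show t'.reverse ++ [c, b, a] = (t'.reverse ++ [c, b]) ++ [a] by simp]
    rw [PySem.List.pyGetD_neg_one_append_singleton]
    rw [show (t'.reverse ++ [c, b]) ++ [a] = (t'.reverse ++ [c]) ++ [b, a] by simp]
    rw [pyGetD_snoc2]
    rw [show (t'.reverse ++ [c]) ++ [b, a] = t'.reverse ++ [c, b, a] by simp]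
    rw [pyGetD_snoc3]
    have hvt : pvVTop (a :: b :: c :: t') = max (max (a - 2) (min (a - 1) b)) c := rfl
    have hrr : (t'.reverse ++ [c, b, a]).reverse = a :: b :: c :: t' := by simp
    rw [hrr, hvt]
    omega

-- fold-max facts
theorem foldmax_ge_init (ls : List (List Int)) : ∀ a : Int, a ≤ ls.foldl (fun r l => max r (pvV l)) a := by
  induction ls with
  | nil => intro a; simp
  | cons x t ih => intro a; have := ih (max a (pvV x)); simp only [List.foldl_cons]; omega

theorem foldmax_ge_mem (ls : List (List Int)) : ∀ (a : Int) (l : List Int), l ∈ ls → pvV l ≤ ls.foldl (fun r l => max r (pvV l)) a := by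
  induction ls with
  | nil => simp
  | cons x t ih =>
    intro a l hl
    rcases List.mem_cons.mp hl with rfl | hm
    · have := foldmax_ge_init t (max a (pvV l)); simp only [List.foldl_cons]; omega
    · simpa using ih (max a (pvV x)) l hm

theorem foldmax_cases (ls : List (List Int)) : ∀ a : Int,
    ls.foldl (fun r l => max r (pvV l)) a = a ∨ ∃ l ∈ ls, ls.foldl (fun r l => max r (pvV l)) a = pvV l := by
  induction ls with
  | nil => intro a; simp
  | cons x t ih =>
    intro a
    simp only [List.foldl_cons]
    rcases ih (max a (pvV x)) with h | ⟨l, hl, h⟩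
    · rcases (by omega : max a (pvV x) = a ∨ max a (pvV x) = pvV x) with h' | h'
      · left; rw [h, h']
      · right; exact ⟨x, by simp, by rw [h, h']⟩
    · right; exact ⟨l, by simp [hl], h⟩

theorem foldStepA (ls : List (List Int)) : ∀ res : Int, -1 ≤ res →
    ls.foldl pvStepA res = ls.foldl (fun r l => max r (pvV l)) res := by
  induction ls with
  | nil => intro res _; simp
  | cons x t ih =>
    intro res hres
    simp only [List.foldl_cons]
    rw [stepA_eq x res hres]
    exact ih (max res (pvV x)) (by omega)

-- A's bucket-building loop characterised
theorem buildA (cnt : List (Char × Int)) : ∀ ls : List (List Int), ls.length = 26 →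
    (∀ p ∈ cnt, 71 ≤ p.1.toNat ∧ p.1.toNat ≤ 122) →
    (cnt.foldl (fun ls p =>
      let i : Int := (p.1.toNat : Int) - 97
      match PySem.List.pyGet? ls i with
      | some l => PySem.List.pySetD ls i (l ++ [p.2])
      | none => ls) ls).length = 26 ∧
    ∀ j : Nat, ∀ old, ls[j]? = some old →
      (cnt.foldl (fun ls p =>
        let i : Int := (p.1.toNat : Int) - 97
        match PySem.List.pyGet? ls i with
        | some l => PySem.List.pySetD ls i (l ++ [p.2])
        | none => ls) ls)[j]? = some (old ++ pvBucketI cnt j) := by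
  induction cnt with
  | nil =>
    intro ls hlen _
    refine ⟨hlen, ?_⟩
    intro j old hold
    simpa [pvBucketI] using hold
  | cons p tl ih =>
    intro ls hlen hlow
    have hp := hlow p (by simp)
    obtain ⟨hacc1, hacc2⟩ := accessA ls hlen p.1 hp.1 hp.2
    have hjp : pvIdx p.1 < ls.length := by rw [hlen]; exact pvIdx_lt p.1
    have hget : PySem.List.pyGet? ls ((p.1.toNat : Int) - 97) = some ls[pvIdx p.1] := by
      rw [hacc1, List.getElem?_eq_getElem hjp]
    simp only [List.foldl_cons, hget]
    rw [hacc2 (ls[pvIdx p.1] ++ [p.2])]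
    set ls' := ls.set (pvIdx p.1) (ls[pvIdx p.1] ++ [p.2]) with hls'
    have hlen' : ls'.length = 26 := by simp [hls', hlen]
    obtain ⟨hL, hG⟩ := ih ls' hlen' (fun q hq => hlow q (by simp [hq]))
    refine ⟨hL, ?_⟩
    intro j old hold
    by_cases hcp : pvIdx p.1 = j
    · rw [← hcp, List.getElem?_eq_getElem hjp] at hold
      have holdv : old = ls[pvIdx p.1] := by simpa using hold.symm
      have hold' : ls'[j]? = some (old ++ [p.2]) := by
        rw [hls', List.getElem?_set, if_pos hcp, if_pos hjp, holdv]
      rw [hG j (old ++ [p.2]) hold']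
      have hbeq : (pvIdx p.1 == j) = true := by simp [hcp]
      simp [pvBucketI, List.filter_cons, hbeq]
    · have hold' : ls'[j]? = some old := by
        rw [hls', List.getElem?_set, if_neg hcp]
        exact hold
      rw [hG j old hold']
      have hbeq : (pvIdx p.1 == j) = false := by simp [hcp]
      simp [pvBucketI, List.filter_cons, hbeq]

-- inner max fold (best0)
theorem innermax_ge_init (rs : List Int) : ∀ b : Int, b ≤ rs.foldl (fun b r => max b r) b := by
  induction rs with
  | nil => intro b; simp
  | cons x t ih => intro b; have := ih (max b x); simp only [List.foldl_cons]; omega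

theorem innermax_ge_mem (rs : List Int) : ∀ (b : Int) (r : Int), r ∈ rs → r ≤ rs.foldl (fun b r => max b r) b := by
  induction rs with
  | nil => simp
  | cons x t ih =>
    intro b r hr
    rcases List.mem_cons.mp hr with rfl | hm
    · have := innermax_ge_init t (max b r); simp only [List.foldl_cons]; omega
    · simpa using ih (max b x) r hm

theorem best0_facts (vs : List (List Int)) : ∀ b : Int,
    b ≤ vs.foldl (fun b rs => rs.foldl (fun b r => max b r) b) b ∧
    ∀ rs ∈ vs, ∀ r ∈ rs, r ≤ vs.foldl (fun b rs => rs.foldl (fun b r => max b r) b) b := by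
  induction vs with
  | nil => intro b; simp
  | cons x t ih =>
    intro b
    simp only [List.foldl_cons]
    obtain ⟨ih1, ih2⟩ := ih (x.foldl (fun b r => max b r) b)
    constructor
    · have := innermax_ge_init x b; omega
    · intro rs hrs r hr
      rcases List.mem_cons.mp hrs with rfl | hm
      · have := innermax_ge_mem rs b r hr; omega
      · exact ih2 rs hm r hr

-- binary search
theorem bisect_correct (d : PySem.Dict Char (List Int)) (R : Int)
    (hGF : ∀ L : Int, 1 ≤ L → (pvFeasible d L = true ↔ L ≤ R)) :
    ∀ n : Nat, ∀ lo hi best : Int, (hi + 1 - lo).toNat ≤ n → 1 ≤ lo → R ≤ hi → best < lo →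
    (best = R ∨ lo ≤ R) → pvBisect d lo hi best = R := by
  intro n
  induction n with
  | zero =>
    intro lo hi best hfuel _ hRhi hblo hd
    have hlh : ¬ (lo ≤ hi) := by omega
    rw [pvBisect, dif_neg hlh]
    omega
  | succ n ih =>
    intro lo hi best hfuel hlo1 hRhi hblo hd
    by_cases hlh : lo ≤ hi
    · rw [pvBisect, dif_pos hlh]
      obtain ⟨hm1, hm2⟩ := PySem.Int.floordiv_two_mid_bounds hlh
      set mid := PySem.Int.floordiv (lo + hi) 2 with hmid
      by_cases hfeas : pvFeasible d mid = true
      · rw [if_pos hfeas]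
        have hmidR : mid ≤ R := (hGF mid (by omega)).mp hfeas
        exact ih (mid + 1) hi mid (by omega) (by omega) hRhi (by omega) (by omega)
      · rw [if_neg hfeas]
        have hmidR : ¬ (mid ≤ R) := fun h => hfeas ((hGF mid (by omega)).mpr h)
        exact ih lo (mid - 1) best (by omega) hlo1 (by omega) hblo hd
    · rw [pvBisect, dif_neg hlh]
      omega

-- the value both programs compute, as a fold of per-bucket closed forms
theorem maximumLength1_spec : Claim_equal_maximumLength1 := by
  intro s _hdom hpre
  unfold Spec_maximumLength1 maximumLength1 maximumLength1_alt
  obtain ⟨hpre1, hpre2⟩ := hpre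
  have hrange : ∀ c ∈ s.toList, 71 ≤ c.toNat ∧ c.toNat ≤ 122 := by
    intro c hc
    have := List.all_eq_true.mp hpre1 c hc
    simpa using this
  have hinj : ∀ c ∈ s.toList, ∀ d ∈ s.toList, pvIdx c = pvIdx d → c = d := by
    intro c hc d hd h
    have := List.all_eq_true.mp (List.all_eq_true.mp hpre2 c hc) d hd
    simp at this
    tauto
  set cs := s.toList with hcs
  set cnt := pvRuns cs with hcnt
  have hlow : ∀ p ∈ cnt, 71 ≤ p.1.toNat ∧ p.1.toNat ≤ 122 := fun p hp => hrange p.1 (pvRuns_fst cs p hp)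
  have hposc : ∀ p ∈ cnt, 1 ≤ p.2 := pvRuns_pos cs
  -- bucket element facts
  have hbpos : ∀ c : Char, ∀ r ∈ pvBucket cnt c, 1 ≤ r := by
    intro c r hr
    simp only [pvBucket, List.mem_map, List.mem_filter] at hr
    obtain ⟨p, ⟨hp, _⟩, rfl⟩ := hr
    exact hposc p hp
  have hbposI : ∀ j : Nat, ∀ r ∈ pvBucketI cnt j, 1 ≤ r := by
    intro j r hr
    simp only [pvBucketI, List.mem_map, List.mem_filter] at hr
    obtain ⟨p, ⟨hp, _⟩, rfl⟩ := hr
    exact hposc p hp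
  -- a char-keyed bucket equals its slot's bucket, given the no-collision hypothesis
  have hfeq : ∀ c ∈ cs, pvBucket cnt c = pvBucketI cnt (pvIdx c) := by
    intro c hc
    unfold pvBucket pvBucketI
    congr 1
    apply List.filter_congr
    intro q hq
    have hqs : q.1 ∈ cs := pvRuns_fst cs q hq
    by_cases hqc : q.1 = c
    · simp [hqc]
    · have : pvIdx q.1 ≠ pvIdx c := fun h => hqc (hinj q.1 hqs c hc h)
      simp [hqc, this]
  -- the A-side 26-slot array equals the list of buckets
  have hinit : ((PySem.List.pyRange 0 26 1).map (fun _ => ([] : List Int))) = List.replicate 26 [] := by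
    rw [List.eq_replicate_iff]
    constructor
    · simp [PySem.List.length_pyRange_one]
    · intro b hb
      simp only [List.mem_map] at hb
      obtain ⟨_, _, rfl⟩ := hb
      rfl
  obtain ⟨hAlen, hAget⟩ := buildA cnt (List.replicate 26 []) (by simp) hlow
  have hlengths :
      (cnt.foldl (fun ls p =>
        let i : Int := (p.1.toNat : Int) - 97
        match PySem.List.pyGet? ls i with
        | some l => PySem.List.pySetD ls i (l ++ [p.2])
        | none => ls) (List.replicate 26 [])) = pvBuckets cnt := by
    apply List.ext_getElem?
    intro j
    by_cases hj : j < 26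
    · have hold : (List.replicate 26 ([] : List Int))[j]? = some [] := by
        rw [List.getElem?_replicate, if_pos hj]
      rw [hAget j [] hold]
      simp [pvBuckets, hj]
    · have h1 : (cnt.foldl (fun ls p =>
        let i : Int := (p.1.toNat : Int) - 97
        match PySem.List.pyGet? ls i with
        | some l => PySem.List.pySetD ls i (l ++ [p.2])
        | none => ls) (List.replicate 26 ([] : List Int))).length = 26 := hAlen
      rw [List.getElem?_eq_none (by rw [h1]; omega),
          List.getElem?_eq_none (by simp [pvBuckets]; omega)]
  -- rewrite A's side into the fold of per-bucket closed forms
  dsimp only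
  rw [hinit, hlengths]
  change (pvBuckets cnt).foldl pvStepA (-1) = _
  rw [foldStepA (pvBuckets cnt) (-1) (by omega)]
  -- dict facts
  set d := cnt.foldl (fun (d : PySem.Dict Char (List Int)) p => d.modify p.1 [] (· ++ [p.2])) PySem.Dict.empty with hd
  have hgetD : ∀ c : Char, d.getD c [] = pvBucket cnt c := by
    intro c
    have := PySem.Dict.getD_foldl_modify_append cnt PySem.Dict.empty c
    simpa [hd, pvBucket, PySem.Dict.getD_empty] using this
  have hnodup : d.keys.Nodup := by
    rw [hd]
    exact PySem.Dict.nodup_keys_foldl_modify_key cnt (fun p => p.1) [] (fun _ p => (· ++ [p.2]))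
      PySem.Dict.empty PySem.Dict.nodup_keys_empty
  have hkeys : d.keys = PySem.Set.ofList (cnt.map (fun p => p.1)) := by
    rw [hd]
    have := PySem.Dict.keys_foldl_modify_key cnt (fun p => p.1) [] (fun _ p => (· ++ [p.2])) PySem.Dict.empty
    simpa [PySem.Dict.keys_empty, PySem.Set.update_nil_left] using this
  have hvalues : d.values = d.keys.map (fun k => d.getD k []) := PySem.Dict.values_eq_map_keys d hnodup []
  have hkeycs : ∀ k ∈ d.keys, k ∈ cs := by
    intro k hk
    rw [hkeys, PySem.Set.mem_ofList] at hk
    obtain ⟨p, hp, rfl⟩ := List.mem_map.mp hk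
    exact pvRuns_fst cs p hp
  have hvals : ∀ rs ∈ d.values, ∃ c : Char, c ∈ cs ∧ rs = pvBucket cnt c := by
    intro rs hrs
    rw [hvalues] at hrs
    obtain ⟨k, hk, rfl⟩ := List.mem_map.mp hrs
    exact ⟨k, hkeycs k hk, (hgetD k).symm ▸ rfl⟩
  have hvalmem : ∀ c : Char, pvBucket cnt c ≠ [] → pvBucket cnt c ∈ d.values := by
    intro c hne
    have hcin : c ∈ cnt.map (fun p => p.1) := by
      rcases hfe : List.filter (fun p => p.1 == c) cnt with _ | ⟨p, tl⟩
      · exact absurd (by simp [pvBucket, hfe]) hne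
      · have hp : p ∈ List.filter (fun p => p.1 == c) cnt := by rw [hfe]; simp
        have := List.of_mem_filter hp
        exact List.mem_map.mpr ⟨p, List.mem_of_mem_filter hp, by simpa using this⟩
    rw [hvalues]
    refine List.mem_map.mpr ⟨c, ?_, hgetD c⟩
    rw [hkeys, PySem.Set.mem_ofList]
    exact hcin
  have hbmem : ∀ c ∈ cs, pvBucket cnt c ∈ pvBuckets cnt := by
    intro c hc
    rw [hfeq c hc]
    exact List.mem_map.mpr ⟨pvIdx c, List.mem_range.mpr (pvIdx_lt c), rfl⟩
  have hbsurj : ∀ l ∈ pvBuckets cnt, ∃ j : Nat, l = pvBucketI cnt j := by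
    intro l hl
    obtain ⟨j, _, rfl⟩ := List.mem_map.mp hl
    exact ⟨j, rfl⟩
  -- a nonempty slot bucket is some character's bucket, hence a dict value
  have hslot : ∀ j : Nat, pvBucketI cnt j ≠ [] → pvBucketI cnt j ∈ d.values := by
    intro j hne
    rcases hfe : List.filter (fun p => pvIdx p.1 == j) cnt with _ | ⟨p, tl⟩
    · exact absurd (by simp [pvBucketI, hfe]) hne
    · have hp : p ∈ List.filter (fun p => pvIdx p.1 == j) cnt := by rw [hfe]; simp
      have hpj : pvIdx p.1 = j := by simpa using List.of_mem_filter hp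
      have hps : p.1 ∈ cs := pvRuns_fst cs p (List.mem_of_mem_filter hp)
      have heq : pvBucketI cnt j = pvBucket cnt p.1 := by rw [hfeq p.1 hps, hpj]
      rw [heq]
      apply hvalmem
      rw [← heq]
      exact hne
  set R := (pvBuckets cnt).foldl (fun r l => max r (pvV l)) (-1) with hR
  clear_value R
  have hRm1 : -1 ≤ R := by rw [hR]; exact foldmax_ge_init _ _
  -- global feasibility ↔ L ≤ R
  have hGF : ∀ L : Int, 1 ≤ L → (pvFeasible d L = true ↔ L ≤ R) := by
    intro L hL
    constructor
    · intro hfe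
      unfold pvFeasible at hfe
      obtain ⟨rs, hrs, hsum⟩ := List.any_eq_true.mp hfe
      replace hsum := of_decide_eq_true hsum
      rw [PySem.List.foldl_add rs (fun r => max 0 (r - L + 1)) 0] at hsum
      obtain ⟨c, hccs, rfl⟩ := hvals rs hrs
      have h3 : 3 ≤ pvF (pvBucket cnt c) L := by
        have : (List.map (fun r => max 0 (r - L + 1)) (pvBucket cnt c)).sum = pvF (pvBucket cnt c) L := rfl
        omega
      have hLe := (pvKey _ (hbpos c) L hL).mp h3
      have := foldmax_ge_mem (pvBuckets cnt) (-1) _ (hbmem c hccs)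
      omega
    · intro hLR
      rcases foldmax_cases (pvBuckets cnt) (-1) with hcase | ⟨l, hl, hcase⟩
      · rw [← hR] at hcase; omega
      · rw [← hR] at hcase
        obtain ⟨j, rfl⟩ := hbsurj l hl
        have h3 : 3 ≤ pvF (pvBucketI cnt j) L := (pvKey _ (hbposI j) L hL).mpr (by omega)
        have hne : pvBucketI cnt j ≠ [] := by
          intro h0
          rw [h0] at h3
          simp [pvF] at h3
        unfold pvFeasible
        apply List.any_eq_true.mpr
        refine ⟨pvBucketI cnt j, hslot j hne, ?_⟩
        apply decide_eq_true
        rw [PySem.List.foldl_add (pvBucketI cnt j) (fun r => max 0 (r - L + 1)) 0]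
        have : (List.map (fun r => max 0 (r - L + 1)) (pvBucketI cnt j)).sum = pvF (pvBucketI cnt j) L := rfl
        omega
  -- best0 bounds
  set best0 := d.values.foldl (fun b rs => rs.foldl (fun b r => max b r) b) 0 with hb0
  clear_value best0
  obtain ⟨hb0ge, hb0ub⟩ := best0_facts d.values 0
  rw [← hb0] at hb0ge hb0ub
  have hRb : R ≤ best0 := by
    rcases foldmax_cases (pvBuckets cnt) (-1) with hcase | ⟨l, hl, hcase⟩
    · rw [← hR] at hcase; omega
    · rw [← hR] at hcase
      obtain ⟨j, rfl⟩ := hbsurj l hl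
      by_cases hne : pvBucketI cnt j = []
      · have hv0 : pvV ([] : List Int) = -1 := rfl
        rw [hne] at hcase
        omega
      · have hub : ∀ r ∈ pvBucketI cnt j, r ≤ best0 := fun r hr => hb0ub _ (hslot j hne) r hr
        have := pvV_le _ best0 hb0ge hub
        omega
  -- run the binary search
  have hdisj : (-1 : Int) = R ∨ (1 : Int) ≤ R := by
    rcases foldmax_cases (pvBuckets cnt) (-1) with hcase | ⟨l, hl, hcase⟩
    · rw [← hR] at hcase; omega
    · rw [← hR] at hcase
      obtain ⟨j, rfl⟩ := hbsurj l hl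
      rcases pvV_pos_or _ (hbposI j) with h | h <;> omega
  have hfuel : (best0 + 1 - 1).toNat ≤ best0.toNat + 1 := by omega
  rw [bisect_correct d R hGF (best0.toNat + 1) 1 best0 (-1) hfuel (by omega) hRb (by omega) hdisj]
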